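-- pv_equiv track=rewrite | github.com/ariadna-ge/miniCompilador | analisis_sintactico.py | extraer_instrucciones_begin_end
-- ===== SOURCE A (Python) =====
-- def extraer_instrucciones_begin_end(tokens): #Extrae todas las instrucciones individuales entre begin y end
--     if not tokens or tokens[0].lower() != 'begin':
--         return []
--
--     instrucciones = []
--     instruccion_actual = []
--     i = 1  # Empezar después de 'begin'
--     nivel_begin = 1
--
--     while i < len(tokens) and nivel_begin > 0:
--         token = tokens[i]
--
--         if token.lower() == 'begin':
--             nivel_begin += 1
--             instruccion_actual.append(token)
--         elif token.lower() == 'end':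
--             nivel_begin -= 1
--             if nivel_begin == 0:
--                 # Encontramos el 'end' que cierra nuestro 'begin'
--                 if instruccion_actual:
--                     instrucciones.append(instruccion_actual[:])  # Copia de la instrucción actual
--                 break
--             else:
--                 instruccion_actual.append(token)
--         elif token == ';':
--             # Fin de una instrucción
--             if instruccion_actual:
--                 instruccion_actual.append(token)  # Incluir el punto y coma
--                 instrucciones.append(instruccion_actual[:])  # Copia de la instrucción
--                 instruccion_actual = []
--         else:
--             instruccion_actual.append(token)
--         i += 1
--
--     # Si quedó una instrucción sin punto y coma al final
--     if instruccion_actual: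
--         instrucciones.append(instruccion_actual)
--     return instrucciones
-- ===== SOURCE B (Python) =====
-- def extraer_instrucciones_begin_end(tokens):
--     # Two-pass: locate the matching 'end' first, then split the inner slice on ';'.
--     # Unlike A, the final instruction is appended exactly once.
--     if not tokens or tokens[0].lower() != 'begin':
--         return []
--     nivel = 1
--     j = len(tokens)
--     for k in range(1, len(tokens)):
--         t = tokens[k].lower()
--         if t == 'begin':
--             nivel += 1
--         elif t == 'end':
--             nivel -= 1
--             if nivel == 0:
--                 j = k
--                 break
--     instrucciones = []
--     actual = []
--     for token in tokens[1:j]: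
--         if token == ';':
--             if actual:
--                 actual.append(token)
--                 instrucciones.append(actual)
--                 actual = []
--         else:
--             actual.append(token)
--     if actual:
--         instrucciones.append(actual)
--     return instrucciones
-- ===== Notes on version B (the rewrite author's own statement) =====
-- stated objective: alternative
-- what changed: B replaces A's single stateful while-loop (index, nesting level, current group, break-then-fallthrough) by two independent passes: first locate the matching closing 'end' with a nesting counter, then split the inner slice tokens[1:j] on ';' tokens; this also makes B append the final instruction exactly once.
-- intended difference: On token lists starting with 'begin' whose matching closing 'end' is immediately preceded by a non-';' token, A appends the last instruction TWICE (once at the break, once in the post-loop flush, e.g. [['x'],['x']] for ['begin','x','end']) while B returns it once ([['x']]), which is the intended split. — e.g. on extraer_instrucciones_begin_end(["begin", "x", "end"]): A returns [["x"], ["x"]], B returns [["x"]]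
import Mathlib
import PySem

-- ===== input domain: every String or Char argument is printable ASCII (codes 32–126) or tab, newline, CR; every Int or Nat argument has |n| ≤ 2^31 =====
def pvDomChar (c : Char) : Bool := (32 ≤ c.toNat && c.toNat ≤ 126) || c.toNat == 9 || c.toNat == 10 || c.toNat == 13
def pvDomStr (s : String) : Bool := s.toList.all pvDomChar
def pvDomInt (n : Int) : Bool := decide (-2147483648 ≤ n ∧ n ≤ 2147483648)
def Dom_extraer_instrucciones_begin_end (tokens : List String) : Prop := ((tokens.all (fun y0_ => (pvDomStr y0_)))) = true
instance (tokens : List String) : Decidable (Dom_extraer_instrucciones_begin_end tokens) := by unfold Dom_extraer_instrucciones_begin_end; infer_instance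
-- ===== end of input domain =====

-- B re-decomposes A's single stateful while-loop into two passes (find the matching 'end',
-- then split the inner slice on ';'); B appends the final instruction once where A appends it twice.

-- ===== PORT A =====
-- the while-loop: state (remaining tokens, nivel_begin, instruccion_actual, instrucciones);
-- returns (instrucciones, instruccion_actual) at loop exit (break or end of tokens)
def pvALoop : List String → Int → List String → List (List String) → List (List String) × List String
  | [], _, actual, instr => (instr, actual)
  | token :: rest, nivel, actual, instr =>
    if nivel ≤ 0 then (instr, actual)
    else if PySem.Str.lower token = "begin" then pvALoop rest (nivel + 1) (actual ++ [token]) instr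
    else if PySem.Str.lower token = "end" then
      if nivel - 1 = 0 then ((if actual = [] then instr else instr ++ [actual]), actual)  -- break
      else pvALoop rest (nivel - 1) (actual ++ [token]) instr
    else if token = ";" then
      if actual = [] then pvALoop rest nivel actual instr
      else pvALoop rest nivel [] (instr ++ [actual ++ [token]])
    else pvALoop rest nivel (actual ++ [token]) instr

def extraer_instrucciones_begin_end (tokens : List String) : List (List String) :=
  match tokens with
  | [] => []
  | t0 :: rest =>
    if PySem.Str.lower t0 ≠ "begin" then []
    else
      let p := pvALoop rest 1 [] []
      -- post-loop: if instruccion_actual: instrucciones.append(instruccion_actual)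
      if p.2 = [] then p.1 else p.1 ++ [p.2]

-- ===== PORT B =====
-- first pass: for k in range(1, len(tokens)): nesting counter, break with j = k at the closing 'end'
def pvBFindJ : List String → Int → Nat → Option Nat
  | [], _, _ => none
  | token :: rest, nivel, k =>
    if PySem.Str.lower token = "begin" then pvBFindJ rest (nivel + 1) (k + 1)
    else if PySem.Str.lower token = "end" then
      if nivel - 1 = 0 then some k else pvBFindJ rest (nivel - 1) (k + 1)
    else pvBFindJ rest nivel (k + 1)

-- second pass: split tokens[1:j] on ';'
def pvBSplit : List String → List String → List (List String) → List (List String)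
  | [], actual, instr => if actual = [] then instr else instr ++ [actual]
  | token :: rest, actual, instr =>
    if token = ";" then
      if actual = [] then pvBSplit rest actual instr
      else pvBSplit rest [] (instr ++ [actual ++ [token]])
    else pvBSplit rest (actual ++ [token]) instr

def extraer_instrucciones_begin_end_alt (tokens : List String) : List (List String) :=
  match tokens with
  | [] => []
  | t0 :: rest =>
    if PySem.Str.lower t0 ≠ "begin" then []
    else
      let j : Nat := (pvBFindJ rest 1 1).getD (t0 :: rest).length
      pvBSplit (PySem.List.slice (t0 :: rest) (some 1) (some (j : Int))) [] []

-- ===== PRECONDITION & SPEC =====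
-- balance of 'end' minus 'begin' tokens (case-insensitive) in a prefix; used only to state D_
def pvBal (l : List String) : Int :=
  (l.countP (fun t => PySem.Str.lower t == "end") : Int) -
  (l.countP (fun t => PySem.Str.lower t == "begin") : Int)

-- On token lists starting with 'begin' whose matching closing 'end' is immediately preceded by a
-- non-';' token, A appends the final instruction twice (at the break and again after the loop),
-- B returns it once, which is the intended split.
def D_extraer_instrucciones_begin_end (tokens : List String) : Prop :=
  tokens ≠ [] ∧ PySem.Str.lower (tokens.headD "") = "begin" ∧
  ∃ m, m < tokens.tail.length ∧ 1 ≤ m ∧ pvBal (tokens.tail.take (m + 1)) = 1 ∧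
    (∀ k, k ≤ m → pvBal (tokens.tail.take k) < 1) ∧ (tokens.tail.take m).getLast? ≠ some ";"
instance (tokens : List String) : Decidable (D_extraer_instrucciones_begin_end tokens) := by
  unfold D_extraer_instrucciones_begin_end; infer_instance

def Spec_extraer_instrucciones_begin_end (tokens : List String) (out : List (List String)) : Prop :=
  ¬ D_extraer_instrucciones_begin_end tokens → out = extraer_instrucciones_begin_end_alt tokens
instance (tokens : List String) (out : List (List String)) : Decidable (Spec_extraer_instrucciones_begin_end tokens out) := by
  unfold Spec_extraer_instrucciones_begin_end; infer_instance

def pvDiffWitness_extraer_instrucciones_begin_end : List String := ["begin", "x", "end"]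
def pvDiffWitnessOut_extraer_instrucciones_begin_end : (List (List String)) × (List (List String)) :=
  ([["x"], ["x"]], [["x"]])

-- ===== CLAIM (what is proved, stated in full; the proofs are below) =====
def Claim_unchanged_extraer_instrucciones_begin_end : Prop := ∀ (tokens : List String), Dom_extraer_instrucciones_begin_end tokens → Spec_extraer_instrucciones_begin_end tokens (extraer_instrucciones_begin_end tokens)
def Claim_changed_extraer_instrucciones_begin_end : Prop := Dom_extraer_instrucciones_begin_end (pvDiffWitness_extraer_instrucciones_begin_end) ∧ D_extraer_instrucciones_begin_end (pvDiffWitness_extraer_instrucciones_begin_end) ∧ extraer_instrucciones_begin_end (pvDiffWitness_extraer_instrucciones_begin_end) = pvDiffWitnessOut_extraer_instrucciones_begin_end.1 ∧ extraer_instrucciones_begin_end_alt (pvDiffWitness_extraer_instrucciones_begin_end) = pvDiffWitnessOut_extraer_instrucciones_begin_end.2 ∧ pvDiffWitnessOut_extraer_instrucciones_begin_end.1 ≠ pvDiffWitnessOut_extraer_instrucciones_begin_end.2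
def Claim_exact_extraer_instrucciones_begin_end : Prop := ∀ (tokens : List String), Dom_extraer_instrucciones_begin_end tokens → D_extraer_instrucciones_begin_end tokens → extraer_instrucciones_begin_end tokens ≠ extraer_instrucciones_begin_end_alt tokens

-- ===== LEMMAS AND PROOFS =====

-- proof-side helpers
def pvWrap (p : List (List String) × List String) : List (List String) :=
  if p.2 = [] then p.1 else p.1 ++ [p.2]

-- index (within l) of the closing 'end' for nesting level nivel, if any
def pvClose : List String → Int → Option Nat
  | [], _ => none
  | token :: rest, nivel =>
    if PySem.Str.lower token = "begin" then (pvClose rest (nivel + 1)).map (· + 1)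
    else if PySem.Str.lower token = "end" then
      if nivel - 1 = 0 then some 0 else (pvClose rest (nivel - 1)).map (· + 1)
    else (pvClose rest nivel).map (· + 1)

-- pair-returning version of pvBSplit
def pvSplitP : List String → List String → List (List String) → List (List String) × List String
  | [], actual, instr => (instr, actual)
  | token :: rest, actual, instr =>
    if token = ";" then
      if actual = [] then pvSplitP rest actual instr
      else pvSplitP rest [] (instr ++ [actual ++ [token]])
    else pvSplitP rest (actual ++ [token]) instr

theorem pvLower_ne_semi_begin {t : String} (h : PySem.Str.lower t = "begin") : t ≠ ";" := by
  rintro rfl; exact absurd h (by decide)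

theorem pvLower_ne_semi_end {t : String} (h : PySem.Str.lower t = "end") : t ≠ ";" := by
  rintro rfl; exact absurd h (by decide)

theorem pvBSplit_eq_wrap (l : List String) : ∀ a i, pvBSplit l a i = pvWrap (pvSplitP l a i) := by
  induction l with
  | nil => intro a i; rfl
  | cons t rest ih =>
    intro a i
    simp only [pvBSplit, pvSplitP]
    split_ifs <;> apply ih

theorem pvBFindJ_eq (l : List String) : ∀ nivel k, pvBFindJ l nivel k = (pvClose l nivel).map (k + ·) := by
  induction l with
  | nil => intro nivel k; rfl
  | cons t rest ih =>
    intro nivel k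
    simp only [pvBFindJ, pvClose]
    split_ifs with h1 h2 h3 <;>
      simp [ih, Option.map_map, Function.comp_def, Nat.add_comm, Nat.add_left_comm]

theorem pvALoop_none (l : List String) : ∀ nivel a i, 1 ≤ nivel → pvClose l nivel = none →
    pvALoop l nivel a i = pvSplitP l a i := by
  induction l with
  | nil => intro nivel a i _ _; rfl
  | cons t rest ih =>
    intro nivel a i h1 hc
    by_cases hb : PySem.Str.lower t = "begin"
    · rw [pvClose, if_pos hb, Option.map_eq_none_iff] at hc
      simp only [pvALoop, pvSplitP, if_neg (show ¬ nivel ≤ 0 by omega), if_pos hb,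
        if_neg (pvLower_ne_semi_begin hb)]
      exact ih _ _ _ (by omega) hc
    · by_cases he : PySem.Str.lower t = "end"
      · rw [pvClose, if_neg hb, if_pos he] at hc
        by_cases h0 : nivel - 1 = 0
        · rw [if_pos h0] at hc; simp at hc
        · rw [if_neg h0, Option.map_eq_none_iff] at hc
          simp only [pvALoop, pvSplitP, if_neg (show ¬ nivel ≤ 0 by omega), if_neg hb, if_pos he,
            if_neg h0, if_neg (pvLower_ne_semi_end he)]
          exact ih _ _ _ (by omega) hc
      · rw [pvClose, if_neg hb, if_neg he, Option.map_eq_none_iff] at hc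
        by_cases hsemi : t = ";"
        · by_cases ha : a = []
          · simp only [pvALoop, pvSplitP, if_neg (show ¬ nivel ≤ 0 by omega), if_neg hb, if_neg he,
              if_pos hsemi, if_pos ha]
            exact ih _ _ _ h1 hc
          · simp only [pvALoop, pvSplitP, if_neg (show ¬ nivel ≤ 0 by omega), if_neg hb, if_neg he,
              if_pos hsemi, if_neg ha]
            exact ih _ _ _ h1 hc
        · simp only [pvALoop, pvSplitP, if_neg (show ¬ nivel ≤ 0 by omega), if_neg hb, if_neg he,
            if_neg hsemi]
          exact ih _ _ _ h1 hc

theorem pvALoop_some (l : List String) : ∀ nivel a i m, 1 ≤ nivel → pvClose l nivel = some m →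
    pvALoop l nivel a i = (pvWrap (pvSplitP (l.take m) a i), (pvSplitP (l.take m) a i).2) := by
  induction l with
  | nil => intro nivel a i m _ hc; simp [pvClose] at hc
  | cons t rest ih =>
    intro nivel a i m h1 hc
    by_cases hb : PySem.Str.lower t = "begin"
    · rw [pvClose, if_pos hb, Option.map_eq_some_iff] at hc
      obtain ⟨m', hm', hEq⟩ := hc
      subst hEq
      simp only [pvALoop, if_neg (show ¬ nivel ≤ 0 by omega), if_pos hb]
      rw [ih _ _ _ _ (by omega) hm']
      simp only [List.take_succ_cons, pvSplitP, if_neg (pvLower_ne_semi_begin hb)]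
    · by_cases he : PySem.Str.lower t = "end"
      · rw [pvClose, if_neg hb, if_pos he] at hc
        by_cases h0 : nivel - 1 = 0
        · rw [if_pos h0] at hc
          simp only [Option.some.injEq] at hc
          subst hc
          simp only [pvALoop, if_neg (show ¬ nivel ≤ 0 by omega), if_neg hb, if_pos he, if_pos h0,
            List.take_zero, pvSplitP, pvWrap]
        · rw [if_neg h0, Option.map_eq_some_iff] at hc
          obtain ⟨m', hm', hEq⟩ := hc
          subst hEq
          simp only [pvALoop, if_neg (show ¬ nivel ≤ 0 by omega), if_neg hb, if_pos he, if_neg h0]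
          rw [ih _ _ _ _ (by omega) hm']
          simp only [List.take_succ_cons, pvSplitP, if_neg (pvLower_ne_semi_end he)]
      · rw [pvClose, if_neg hb, if_neg he, Option.map_eq_some_iff] at hc
        obtain ⟨m', hm', hEq⟩ := hc
        subst hEq
        by_cases hsemi : t = ";"
        · by_cases ha : a = []
          · simp only [pvALoop, if_neg (show ¬ nivel ≤ 0 by omega), if_neg hb, if_neg he,
              if_pos hsemi, if_pos ha]
            rw [ih _ _ _ _ h1 hm']
            simp only [List.take_succ_cons, pvSplitP, if_pos hsemi, if_pos ha]
          · simp only [pvALoop, if_neg (show ¬ nivel ≤ 0 by omega), if_neg hb, if_neg he,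
              if_pos hsemi, if_neg ha]
            rw [ih _ _ _ _ h1 hm']
            simp only [List.take_succ_cons, pvSplitP, if_pos hsemi, if_neg ha]
        · simp only [pvALoop, if_neg (show ¬ nivel ≤ 0 by omega), if_neg hb, if_neg he,
            if_neg hsemi]
          rw [ih _ _ _ _ h1 hm']
          simp only [List.take_succ_cons, pvSplitP, if_neg hsemi]

theorem pvSplitP_append (xs : List String) : ∀ ys a i,
    pvSplitP (xs ++ ys) a i = pvSplitP ys (pvSplitP xs a i).2 (pvSplitP xs a i).1 := by
  induction xs with
  | nil => intro ys a i; rfl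
  | cons t rest ih =>
    intro ys a i
    simp only [List.cons_append, pvSplitP]
    split_ifs <;> apply ih

theorem pvSplitP_snd_last (xs : List String) (t : String) (a : List String) (i : List (List String)) :
    (pvSplitP (xs ++ [t]) a i).2 = if t = ";" then [] else (pvSplitP xs a i).2 ++ [t] := by
  rw [pvSplitP_append]
  by_cases ht : t = ";"
  · subst ht
    by_cases h : (pvSplitP xs a i).2 = [] <;> simp [pvSplitP, h]
  · simp [pvSplitP, ht]

theorem pvBal_cons (t : String) (l : List String) :
    pvBal (t :: l) = pvBal l + (if PySem.Str.lower t = "end" then 1 else 0)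
      - (if PySem.Str.lower t = "begin" then 1 else 0) := by
  simp only [pvBal, List.countP_cons]
  split_ifs <;> simp_all <;> ring

theorem pvClose_char (l : List String) : ∀ (nivel : Int) (m : Nat), 1 ≤ nivel →
    (pvClose l nivel = some m ↔
      (pvBal (l.take (m + 1)) = nivel ∧ m < l.length ∧ ∀ k, k ≤ m → pvBal (l.take k) < nivel)) := by
  induction l with
  | nil =>
    intro nivel m h1
    simp [pvClose]
  | cons t rest ih =>
    intro nivel m h1
    have hbal0 : pvBal ([] : List String) = 0 := by simp [pvBal]
    simp only [pvClose]
    split_ifs with hb he h0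
    · -- begin
      have hne : PySem.Str.lower t ≠ "end" := by rw [hb]; decide
      cases m with
      | zero =>
        constructor
        · intro hc; simp at hc
        · rintro ⟨hbal, -, -⟩
          rw [List.take_succ_cons, List.take_zero, pvBal_cons, hbal0] at hbal
          rw [if_neg hne, if_pos hb] at hbal
          omega
      | succ m' =>
        have hih := ih (nivel + 1) m' (by omega)
        constructor
        · intro hc
          obtain ⟨m'', hm'', hEq⟩ := Option.map_eq_some_iff.mp hc
          have hmm : m'' = m' := by omega
          subst hmm
          obtain ⟨hbal, hlen, hall⟩ := hih.mp hm''
          refine ⟨?_, by simpa using Nat.succ_lt_succ hlen, ?_⟩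
          · rw [List.take_succ_cons, pvBal_cons, if_neg hne, if_pos hb]
            omega
          · intro k hk
            cases k with
            | zero => rw [List.take_zero, hbal0]; omega
            | succ k' =>
              rw [List.take_succ_cons, pvBal_cons, if_neg hne, if_pos hb]
              have := hall k' (by omega)
              omega
        · rintro ⟨hbal, hlen, hall⟩
          have hm'' : pvClose rest (nivel + 1) = some m' := by
            apply hih.mpr
            refine ⟨?_, by simpa using hlen, ?_⟩
            · rw [List.take_succ_cons, pvBal_cons, if_neg hne, if_pos hb] at hbal
              omega
            · intro k hk
              have := hall (k + 1) (by omega)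
              rw [List.take_succ_cons, pvBal_cons, if_neg hne, if_pos hb] at this
              omega
          simp [hm'']
    · -- end, nivel - 1 = 0 (so nivel = 1)
      have hn1 : nivel = 1 := by omega
      subst hn1
      cases m with
      | zero =>
        constructor
        · intro _
          refine ⟨?_, by simp, ?_⟩
          · rw [List.take_succ_cons, List.take_zero, pvBal_cons, hbal0]
            rw [if_pos he, if_neg hb]
            omega
          · intro k hk
            have hk0 : k = 0 := by omega
            subst hk0
            rw [List.take_zero, hbal0]; omega
        · intro _; trivial
      | succ m' =>
        constructor
        · intro hc; simp at hc
        · rintro ⟨-, -, hall⟩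
          have h2 := hall 1 (by omega)
          rw [List.take_succ_cons, List.take_zero, pvBal_cons, hbal0] at h2
          rw [if_pos he, if_neg hb] at h2
          omega
    · -- end, nivel ≥ 2
      cases m with
      | zero =>
        constructor
        · intro hc; simp at hc
        · rintro ⟨hbal, -, -⟩
          rw [List.take_succ_cons, List.take_zero, pvBal_cons, hbal0] at hbal
          rw [if_pos he, if_neg hb] at hbal
          omega
      | succ m' =>
        have hih := ih (nivel - 1) m' (by omega)
        constructor
        · intro hc
          obtain ⟨m'', hm'', hEq⟩ := Option.map_eq_some_iff.mp hc
          have hmm : m'' = m' := by omega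
          subst hmm
          obtain ⟨hbal, hlen, hall⟩ := hih.mp hm''
          refine ⟨?_, by simpa using Nat.succ_lt_succ hlen, ?_⟩
          · rw [List.take_succ_cons, pvBal_cons, if_pos he, if_neg hb]
            omega
          · intro k hk
            cases k with
            | zero => rw [List.take_zero, hbal0]; omega
            | succ k' =>
              rw [List.take_succ_cons, pvBal_cons, if_pos he, if_neg hb]
              have := hall k' (by omega)
              omega
        · rintro ⟨hbal, hlen, hall⟩
          have hm'' : pvClose rest (nivel - 1) = some m' := by
            apply hih.mpr
            refine ⟨?_, by simpa using hlen, ?_⟩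
            · rw [List.take_succ_cons, pvBal_cons, if_pos he, if_neg hb] at hbal
              omega
            · intro k hk
              have := hall (k + 1) (by omega)
              rw [List.take_succ_cons, pvBal_cons, if_pos he, if_neg hb] at this
              omega
          simp [hm'']
    · -- neutral token
      cases m with
      | zero =>
        constructor
        · intro hc; simp at hc
        · rintro ⟨hbal, -, -⟩
          rw [List.take_succ_cons, List.take_zero, pvBal_cons, hbal0] at hbal
          rw [if_neg he, if_neg hb] at hbal
          omega
      | succ m' =>
        have hih := ih nivel m' h1
        constructor
        · intro hc
          obtain ⟨m'', hm'', hEq⟩ := Option.map_eq_some_iff.mp hc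
          have hmm : m'' = m' := by omega
          subst hmm
          obtain ⟨hbal, hlen, hall⟩ := hih.mp hm''
          refine ⟨?_, by simpa using Nat.succ_lt_succ hlen, ?_⟩
          · rw [List.take_succ_cons, pvBal_cons, if_neg he, if_neg hb]
            omega
          · intro k hk
            cases k with
            | zero => rw [List.take_zero, hbal0]; omega
            | succ k' =>
              rw [List.take_succ_cons, pvBal_cons, if_neg he, if_neg hb]
              have := hall k' (by omega)
              omega
        · rintro ⟨hbal, hlen, hall⟩
          have hm'' : pvClose rest nivel = some m' := by
            apply hih.mpr
            refine ⟨?_, by simpa using hlen, ?_⟩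
            · rw [List.take_succ_cons, pvBal_cons, if_neg he, if_neg hb] at hbal
              omega
            · intro k hk
              have := hall (k + 1) (by omega)
              rw [List.take_succ_cons, pvBal_cons, if_neg he, if_neg hb] at this
              omega
          simp [hm'']

-- the slice in B: tokens[1:j] is rest.take (j - 1)
theorem pvSlice_take (t0 : String) (rest : List String) (j : Nat) :
    PySem.List.slice (t0 :: rest) (some 1) (some (j : Int)) = rest.take (j - 1) := by
  rw [PySem.List.slice_toNat] <;> simp

-- the common core: both results expressed through pvSplitP
theorem pvCore (t0 : String) (rest : List String) (hb : PySem.Str.lower t0 = "begin") :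
    (pvClose rest 1 = none →
      extraer_instrucciones_begin_end (t0 :: rest) = pvWrap (pvSplitP rest [] []) ∧
      extraer_instrucciones_begin_end_alt (t0 :: rest) = pvWrap (pvSplitP rest [] [])) ∧
    (∀ m, pvClose rest 1 = some m →
      extraer_instrucciones_begin_end (t0 :: rest)
        = pvWrap (pvWrap (pvSplitP (rest.take m) [] []), (pvSplitP (rest.take m) [] []).2) ∧
      extraer_instrucciones_begin_end_alt (t0 :: rest) = pvWrap (pvSplitP (rest.take m) [] [])) := by
  constructor
  · intro hclose
    constructor
    · simp only [extraer_instrucciones_begin_end, if_neg (not_not_intro hb)]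
      rw [pvALoop_none rest 1 [] [] (by omega) hclose]
      rfl
    · simp only [extraer_instrucciones_begin_end_alt, if_neg (not_not_intro hb)]
      rw [pvBFindJ_eq, hclose, Option.map_none, Option.getD_none, pvSlice_take,
        pvBSplit_eq_wrap]
      simp
  · intro m hclose
    constructor
    · simp only [extraer_instrucciones_begin_end, if_neg (not_not_intro hb)]
      rw [pvALoop_some rest 1 [] [] m (by omega) hclose]
      rfl
    · simp only [extraer_instrucciones_begin_end_alt, if_neg (not_not_intro hb)]
      rw [pvBFindJ_eq, hclose, Option.map_some, Option.getD_some, pvSlice_take,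
        pvBSplit_eq_wrap]
      simp

-- ===== VERDICT (by name: the statement is the Claim_ definition above) =====
theorem extraer_instrucciones_begin_end_spec : Claim_unchanged_extraer_instrucciones_begin_end := by
  intro tokens _
  unfold Spec_extraer_instrucciones_begin_end
  intro hnD
  cases tokens with
  | nil => rfl
  | cons t0 rest =>
    by_cases hb : PySem.Str.lower t0 = "begin"
    · cases hclose : pvClose rest 1 with
      | none =>
        obtain ⟨hA, hB⟩ := (pvCore t0 rest hb).1 hclose
        rw [hA, hB]
      | some m =>
        obtain ⟨hA, hB⟩ := (pvCore t0 rest hb).2 m hclose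
        obtain ⟨hbal, hlen, hall⟩ := ((pvClose_char rest 1 m (by omega)).mp hclose)
        have hkey : m = 0 ∨ (rest.take m).getLast? = some ";" := by
          by_contra hcon
          push_neg at hcon
          refine hnD ?_
          unfold D_extraer_instrucciones_begin_end
          exact ⟨by simp, by simpa using hb, m, by simpa using hlen, by omega, hbal, hall, hcon.2⟩
        have hsnd : (pvSplitP (rest.take m) [] []).2 = [] := by
          rcases hkey with h0 | hlast
          · subst h0; rfl
          · obtain ⟨xs, hxs⟩ := List.getLast?_eq_some_iff.mp hlast
            rw [hxs, pvSplitP_snd_last, if_pos rfl]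
        rw [hA, hB, pvWrap, hsnd]
        simp
    · simp [extraer_instrucciones_begin_end, extraer_instrucciones_begin_end_alt, hb]

theorem extraer_instrucciones_begin_end_changed : Claim_changed_extraer_instrucciones_begin_end := by
  unfold Claim_changed_extraer_instrucciones_begin_end; decide

theorem extraer_instrucciones_begin_end_tight : Claim_exact_extraer_instrucciones_begin_end := by
  intro tokens _ hD
  unfold D_extraer_instrucciones_begin_end at hD
  obtain ⟨hne, hhead, m, hlen, hm1, hbal, hall, hlast⟩ := hD
  cases tokens with
  | nil => exact absurd rfl hne
  | cons t0 rest =>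
    simp only [List.headD_cons] at hhead
    simp only [List.tail_cons] at hlen hbal hall hlast
    have hclose : pvClose rest 1 = some m :=
      (pvClose_char rest 1 m (by omega)).mpr ⟨hbal, hlen, hall⟩
    obtain ⟨hA, hB⟩ := (pvCore t0 rest hhead).2 m hclose
    have htake : rest.take m ≠ [] := by
      have : (rest.take m).length = m := List.length_take_of_le (by omega)
      intro h; rw [h] at this; simp at this; omega
    obtain ⟨xs, x, hxs⟩ := (List.eq_nil_or_concat (rest.take m)).resolve_left htake
    rw [List.concat_eq_append] at hxs
    have hx : x ≠ ";" := by
      intro h; subst h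
      rw [hxs] at hlast
      simp at hlast
    have hsnd : (pvSplitP (rest.take m) [] []).2 ≠ [] := by
      rw [hxs, pvSplitP_snd_last, if_neg hx]
      simp
    rw [hA, hB]
    rw [pvWrap]
    simp only [if_neg hsnd]
    intro hEq
    have := congrArg List.length hEq
    simp at this
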